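-- pv_equiv track=rewrite | github.com/teratensor/Prediction | 3_predict/3_235/backtest_mixed.py | get_recent_stats
-- ===== SOURCE A (Python) =====
-- from collections import Counter
--
-- def get_recent_stats(data, n=50):
--     recent = data[-n:]
--     all_freq = Counter()
--     for r in recent:
--         for ball in r['balls']:
--             all_freq[ball] += 1
--
--     sorted_nums = sorted(range(1, 46), key=lambda x: (-all_freq.get(x, 0), x))
--     top24 = set(sorted_nums[:24])
--     rest21 = set(sorted_nums[24:])
--
--     return top24, rest21, all_freq
-- ===== SOURCE B (Python) =====
-- from collections import Counter
--
-- def get_recent_stats(data, n=50):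
--     recent = data[-n:]
--     balls = [b for r in recent for b in r['balls']]
--     c = Counter(balls)
--     # bucket countdown instead of a key-sort: emit numbers grouped by
--     # frequency, highest frequency first, ascending within a group
--     m = max(c.values(), default=0)
--     order = []
--     for f in range(m, -1, -1):
--         order.extend(x for x in range(1, 46) if c.get(x, 0) == f)
--     return set(order[:24]), set(order[24:]), c
-- ===== Notes on version B (the rewrite author's own statement) =====
-- stated objective: alternative
-- what changed: Replaces the library key-sort of 1..45 by (-freq, x) with a bucket countdown (for each frequency from the maximum down to 0, emit the numbers with that count in ascending order) and builds the Counter in one pass over the flattened ball lists instead of a nested increment loop.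
import Mathlib
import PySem

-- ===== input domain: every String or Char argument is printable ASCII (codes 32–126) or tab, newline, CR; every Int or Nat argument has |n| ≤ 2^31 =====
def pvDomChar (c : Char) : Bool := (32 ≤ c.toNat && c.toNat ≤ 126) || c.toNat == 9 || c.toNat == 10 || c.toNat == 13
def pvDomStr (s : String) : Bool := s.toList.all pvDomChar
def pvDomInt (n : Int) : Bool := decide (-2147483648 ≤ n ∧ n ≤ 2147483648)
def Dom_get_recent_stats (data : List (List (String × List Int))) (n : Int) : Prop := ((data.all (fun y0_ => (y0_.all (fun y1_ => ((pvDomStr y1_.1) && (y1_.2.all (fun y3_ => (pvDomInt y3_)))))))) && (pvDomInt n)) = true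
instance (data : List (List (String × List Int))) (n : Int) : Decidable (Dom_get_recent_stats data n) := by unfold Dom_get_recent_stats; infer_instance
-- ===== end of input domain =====

-- B replaces the 45-element key-sort of A by a bucket countdown over frequencies
-- (emit numbers grouped by frequency, highest first, ascending within a group) and
-- flattens the counting into one Counter over the concatenated ball lists; same values
-- (objective: alternative decomposition, not claimed faster).

-- ===== PORT A =====
def get_recent_stats (data : List (List (String × List Int))) (n : Int) : List Int × List Int × (List (Int × Int)) :=
  let recent := PySem.List.slice data (some (-n)) none
  let all_freq : PySem.Dict Int Int :=
    recent.foldl (fun d r =>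
      ((PySem.Dict.mk r).getD "balls" []).foldl (fun d ball => d.modify ball 0 (· + 1)) d)
      PySem.Dict.empty
  let sorted_nums := PySem.List.sorted2 (PySem.List.pyRange 1 46 1)
      (fun x => -(all_freq.getD x 0)) (fun x => x) false
  let top24 := PySem.Set.ofList (PySem.List.slice sorted_nums none (some 24))
  let rest21 := PySem.Set.ofList (PySem.List.slice sorted_nums (some 24) none)
  (top24, rest21, all_freq.items)

-- ===== PORT B =====
def get_recent_stats_alt (data : List (List (String × List Int))) (n : Int) : List Int × List Int × (List (Int × Int)) :=
  let recent := PySem.List.slice data (some (-n)) none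
  let balls := recent.flatMap (fun r => (PySem.Dict.mk r).getD "balls" [])
  let c := PySem.Dict.counter balls
  let m := PySem.List.maxD c.values (fun v => v) 0
  let order := (PySem.List.pyRange m (-1) (-1)).foldl
      (fun acc f => acc ++ (PySem.List.pyRange 1 46 1).filter (fun x => c.getD x 0 == f)) []
  (PySem.Set.ofList (PySem.List.slice order none (some 24)),
   PySem.Set.ofList (PySem.List.slice order (some 24) none),
   c.items)

-- ===== PRECONDITION & SPEC =====
-- Pre_ excludes exactly the inputs where the Python A raises KeyError:
-- a row of the recent slice data[-n:] without a "balls" key.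
def Pre_get_recent_stats (data : List (List (String × List Int))) (n : Int) : Prop :=
  ∀ r ∈ PySem.List.slice data (some (-n)) none,
    (PySem.Dict.mk r).contains "balls" = true
instance (data : List (List (String × List Int))) (n : Int) : Decidable (Pre_get_recent_stats data n) := by unfold Pre_get_recent_stats; infer_instance

def pvWitness_get_recent_stats : (List (List (String × List Int))) × Int :=
  ([[("balls", [1, 2, 2])], [("balls", [2, 7])]], 5)

def Spec_get_recent_stats (data : List (List (String × List Int))) (n : Int) (out : List Int × List Int × (List (Int × Int))) : Prop := out = get_recent_stats_alt data n
instance (data : List (List (String × List Int))) (n : Int) (out : List Int × List Int × (List (Int × Int))) : Decidable (Spec_get_recent_stats data n out) := by unfold Spec_get_recent_stats; infer_instance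

-- ===== CLAIM (what is proved, stated in full; the proofs are below) =====
def Claim_equal_get_recent_stats : Prop := ∀ (data : List (List (String × List Int))) (n : Int), Dom_get_recent_stats data n → Pre_get_recent_stats data n → Spec_get_recent_stats data n (get_recent_stats data n)

-- ===== LEMMAS AND PROOFS =====

-- insertBy only compares the inserted element with list elements, so two
-- comparison functions agreeing on a set S containing everything give equal results
theorem insertBy_congr_on {α : Type} (b₁ b₂ : α → α → Bool) (S : α → Prop)
    (hag : ∀ x y, S x → S y → b₁ x y = b₂ x y) (x : α) (hx : S x) :
    ∀ (acc : List α), (∀ a ∈ acc, S a) →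
      PySem.List.insertBy b₁ x acc = PySem.List.insertBy b₂ x acc := by
  intro acc
  induction acc with
  | nil => intro _; rfl
  | cons y ys ih =>
    intro h
    simp only [PySem.List.insertBy]
    rw [hag x y hx (h y (List.mem_cons_self))]
    split
    · rfl
    · rw [ih (fun a ha => h a (List.mem_cons_of_mem _ ha))]

theorem foldl_insertBy_congr_on {α : Type} (b₁ b₂ : α → α → Bool) (S : α → Prop)
    (hag : ∀ x y, S x → S y → b₁ x y = b₂ x y) :
    ∀ (xs : List α), (∀ x ∈ xs, S x) → ∀ (acc : List α), (∀ a ∈ acc, S a) →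
      xs.foldl (fun a x => PySem.List.insertBy b₁ x a) acc
        = xs.foldl (fun a x => PySem.List.insertBy b₂ x a) acc := by
  intro xs
  induction xs with
  | nil => intro _ acc _; rfl
  | cons x t ih =>
    intro hxs acc hacc
    simp only [List.foldl_cons]
    rw [insertBy_congr_on b₁ b₂ S hag x (hxs x List.mem_cons_self) acc hacc]
    exact ih (fun y hy => hxs y (List.mem_cons_of_mem _ hy)) _
      (fun a ha => ((PySem.List.mem_insertBy b₂ x a acc).mp ha).elim
        (fun h => h ▸ hxs x List.mem_cons_self) (hacc a))

-- the tuple key (-f x, x) of A's sort coincides on 1..45 with the single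
-- integer key -f x * 46 + x
theorem sorted2_eq_sorted_encoded (f : Int → Int) :
    PySem.List.sorted2 (PySem.List.pyRange 1 46 1)
        (fun x => -(f x)) (fun x => x) false
      = PySem.List.sorted (PySem.List.pyRange 1 46 1)
        (fun x => -(f x) * 46 + x) false := by
  have h := foldl_insertBy_congr_on
    (fun a b => decide (-(f a) < -(f b)) || (!decide (-(f b) < -(f a)) && decide (a < b)))
    (fun a b => decide (-(f a) * 46 + a < -(f b) * 46 + b))
    (fun x => 1 ≤ x ∧ x < 46)
    (by
      intro x y hx hy
      rcases hx with ⟨hx1, hx2⟩; rcases hy with ⟨hy1, hy2⟩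
      rw [Bool.eq_iff_iff]
      simp only [Bool.or_eq_true, Bool.and_eq_true, Bool.not_eq_true', decide_eq_true_eq,
        decide_eq_false_iff_not]
      omega)
    (PySem.List.pyRange 1 46 1)
    (by intro x hx; exact (PySem.List.mem_pyRange_one.mp hx))
    [] (by intro a ha; simp at ha)
  simpa [PySem.List.sorted2, PySem.List.sorted] using h

-- B's countdown loop produces exactly the key-sorted order of 1..45
theorem order_eq (c : PySem.Dict Int Int) (m : Int)
    (h0 : ∀ x, 0 ≤ c.getD x 0) (hm : ∀ x, c.getD x 0 ≤ m) :
    PySem.List.sorted (PySem.List.pyRange 1 46 1) (fun x => -(c.getD x 0) * 46 + x) false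
      = (PySem.List.pyRange m (-1) (-1)).foldl
          (fun acc f => acc ++ (PySem.List.pyRange 1 46 1).filter (fun x => c.getD x 0 == f)) [] := by
  rw [PySem.List.foldl_append_eq_flatMap, List.nil_append]
  have hdesc : List.Pairwise (fun f1 f2 => f2 < f1) (PySem.List.pyRange m (-1) (-1)) := by
    rw [PySem.List.pyRange_neg_one_eq_reverse, List.pairwise_reverse]
    exact PySem.List.pairwise_lt_pyRange_one _ _
  apply PySem.List.sorted_eq_of_perm_of_pairwise_lt
  · rw [List.perm_ext_iff_of_nodup _ (PySem.List.nodup_pyRange_one 1 46)]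
    · intro x
      simp only [List.mem_flatMap, List.mem_filter, PySem.List.mem_pyRange_neg_one,
        PySem.List.mem_pyRange_one, beq_iff_eq]
      constructor
      · rintro ⟨f, _, hx, _⟩; exact hx
      · intro hx
        exact ⟨c.getD x 0, ⟨by have := h0 x; omega, hm x⟩, hx, rfl⟩
    · rw [List.nodup_flatMap]
      refine ⟨fun f _ => (PySem.List.nodup_pyRange_one 1 46).filter _, ?_⟩
      refine hdesc.imp_of_mem ?_
      intro f1 f2 _ _ hlt x hx1 hx2
      simp only [List.mem_filter, beq_iff_eq] at hx1 hx2
      omega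
  · rw [List.pairwise_flatMap]
    constructor
    · intro f _
      refine ((PySem.List.pairwise_lt_pyRange_one 1 46).filter _).imp_of_mem ?_
      intro a b ha hb hab
      simp only [List.mem_filter, beq_iff_eq] at ha hb
      omega
    · refine hdesc.imp_of_mem ?_
      intro f1 f2 _ _ hlt x hx y hy
      simp only [List.mem_filter, beq_iff_eq, PySem.List.mem_pyRange_one] at hx hy
      omega

-- frequencies read from a Counter are nonnegative and bounded by max(c.values(), default=0)
theorem counter_bounds (balls : List Int) :
    (∀ x, 0 ≤ (PySem.Dict.counter balls).getD x 0) ∧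
    (∀ x, (PySem.Dict.counter balls).getD x 0
        ≤ PySem.List.maxD (PySem.Dict.counter balls).values (fun v => v) 0) := by
  have h0 : ∀ x, 0 ≤ (PySem.Dict.counter balls).getD x 0 := by
    intro x; rw [PySem.Dict.getD_counter]; exact Int.natCast_nonneg _
  have hvals : (PySem.Dict.counter balls).values
      = (PySem.Dict.counter balls).keys.map (fun k => (PySem.Dict.counter balls).getD k 0) :=
    PySem.Dict.values_eq_map_keys _ (PySem.Dict.nodup_keys_counter balls) 0
  unfold PySem.List.maxD
  rcases hmax : PySem.List.max? (PySem.Dict.counter balls).values (fun v => v) with _ | v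
  · -- no values: the counter is empty, every count is 0
    rw [(PySem.List.max?_eq_none_iff _ _).mp hmax] at hvals
    have hkeys : (PySem.Dict.counter balls).keys = [] := by
      by_contra h
      rcases List.exists_mem_of_ne_nil _ h with ⟨k, hk⟩
      have : (PySem.Dict.counter balls).getD k 0 ∈ ([] : List Int) := by
        rw [hvals]; exact List.mem_map_of_mem hk
      simp at this
    have hballs : balls = [] := by
      have := PySem.Dict.keys_counter balls
      rw [hkeys] at this
      rcases balls with _ | ⟨b, t⟩
      · rfl
      · exfalso
        have hb : b ∈ PySem.Set.ofList (b :: t) := (PySem.Set.mem_ofList _ _).mpr List.mem_cons_self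
        rw [← this] at hb; simp at hb
    subst hballs
    refine ⟨h0, fun x => ?_⟩
    rw [PySem.Dict.getD_counter]; simp
  · -- some maximal value v
    have hv := PySem.List.max?_isMax hmax
    have hvmem := PySem.List.max?_mem hmax
    have hv0 : 0 ≤ v := by
      rw [hvals] at hvmem
      rcases List.mem_map.mp hvmem with ⟨k, _, hk⟩
      rw [← hk]; exact h0 k
    refine ⟨h0, fun x => ?_⟩
    by_cases hc : (PySem.Dict.counter balls).contains x = true
    · have : (PySem.Dict.counter balls).getD x 0 ∈ (PySem.Dict.counter balls).values := by
        rw [hvals]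
        exact List.mem_map_of_mem (((PySem.Dict.contains_iff_mem_keys _ _).mp hc))
      simpa using hv _ this
    · rw [PySem.Dict.getD_of_not_contains _ _ (Bool.not_eq_true _ ▸ hc)]
      simpa using hv0

theorem get_recent_stats_spec : Claim_equal_get_recent_stats := by
  intro data n _ _
  unfold Spec_get_recent_stats get_recent_stats get_recent_stats_alt
  simp only []
  have hdict : (PySem.List.slice data (some (-n)) none).foldl
      (fun d r => ((PySem.Dict.mk r).getD "balls" []).foldl (fun d ball => d.modify ball 0 (· + 1)) d)
      PySem.Dict.empty
    = PySem.Dict.counter ((PySem.List.slice data (some (-n)) none).flatMap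
        (fun r => (PySem.Dict.mk r).getD "balls" [])) := by
    rw [PySem.Dict.counter_eq_foldl, List.foldl_flatMap]
  rw [hdict]
  obtain ⟨h0, hm⟩ := counter_bounds ((PySem.List.slice data (some (-n)) none).flatMap
    (fun r => (PySem.Dict.mk r).getD "balls" []))
  rw [sorted2_eq_sorted_encoded, order_eq _ _ h0 hm]
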